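-- pv_equiv track=rewrite | github.com/YatangLiLab/social_buffering_rat_exposure_test_code | analyze_data_ret_zj_utils/DataAnalyzer.py | find_paired_sessions
-- ===== SOURCE A (Python) =====
-- def find_paired_sessions(Soc_data_merged):
--     """Find paired recording sessions by swapping animal identifiers in session IDs."""
--     session_pairs = []
--     processed = set()
--     all_sessions = sorted(Soc_data_merged.keys())
--     for session in all_sessions:
--         if session in processed:
--             continue
--         # Define swap map for paired animals
--         swap_map = {
--             'Dom': 'Sub',
--             'Sub': 'Dom',
--             'WT': 'SF1',
--             'SF1': 'WT',
--         }
--         # Generate partner session ID by swapping identifiers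
--         parts = session.split('_')
--         parts = [swap_map.get(p, p) for p in parts]
--         partner_session = '_'.join(parts)
--         # Add pair if both sessions exist
--         if partner_session and partner_session in Soc_data_merged:
--             session_pairs.append((session, partner_session))
--             processed.add(session)
--             processed.add(partner_session)
--     return session_pairs
-- ===== SOURCE B (Python) =====
-- def find_paired_sessions(Soc_data_merged):
--     """Find paired recording sessions by swapping animal identifiers in session IDs."""
--     swap_map = {
--         'Dom': 'Sub',
--         'Sub': 'Dom',
--         'WT': 'SF1',
--         'SF1': 'WT',
--     }
--
--     def partner(session):
--         return '_'.join(swap_map.get(p, p) for p in session.split('_'))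
--
--     # The swap is an involution, so every pair is seen from both ends;
--     # emit it once, at its lexicographically smaller endpoint.
--     kept = [session for session in sorted(Soc_data_merged)
--             if (lambda p: p and p in Soc_data_merged and session <= p)(partner(session))]
--     return [(session, partner(session)) for session in kept]
-- ===== Notes on version B (the rewrite author's own statement) =====
-- stated objective: simpler
-- what changed: B drops A's mutable 'processed' set entirely: since the identifier swap is an involution, B keeps a session in one filtered pass exactly when it is the lexicographically smaller (<=) endpoint of its pair, then maps each kept session to its pair.
import Mathlib
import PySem

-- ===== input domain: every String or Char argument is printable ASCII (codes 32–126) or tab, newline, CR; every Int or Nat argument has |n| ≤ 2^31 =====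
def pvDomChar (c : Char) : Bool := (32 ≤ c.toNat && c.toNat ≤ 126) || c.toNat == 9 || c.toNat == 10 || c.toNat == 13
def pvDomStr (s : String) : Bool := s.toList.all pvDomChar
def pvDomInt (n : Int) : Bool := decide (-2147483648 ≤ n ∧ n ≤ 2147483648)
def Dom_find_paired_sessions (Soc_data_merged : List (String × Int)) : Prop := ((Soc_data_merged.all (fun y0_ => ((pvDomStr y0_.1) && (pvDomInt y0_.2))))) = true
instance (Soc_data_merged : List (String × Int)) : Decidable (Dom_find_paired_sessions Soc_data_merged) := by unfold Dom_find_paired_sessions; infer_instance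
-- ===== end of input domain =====

-- B replaces A's processed-set bookkeeping by a single filtered pass that keeps a session exactly
-- when it is the ≤-smaller endpoint of its (involutive) swap pair; objective: simpler.


-- shared helper: the literal swap_map both Pythons build
def pvSwapMap : PySem.Dict String String :=
  PySem.Dict.ofList [("Dom", "Sub"), ("Sub", "Dom"), ("WT", "SF1"), ("SF1", "WT")]

-- `'_'.join(swap_map.get(p, p) for p in session.split('_'))` — A's three partner-building
-- lines and B's helper `partner` are this same computation, shared here as one definition
def pvPartner (session : String) : String :=
  PySem.Str.join "_"
    (((PySem.Chars.splitOn session.toList "_".toList).map String.ofList).map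
      (fun p => pvSwapMap.getD p p))

-- ===== PORT A =====
def find_paired_sessions (Soc_data_merged : List (String × Int)) : List (String × String) :=
  let d := PySem.Dict.ofList Soc_data_merged
  let all_sessions := PySem.List.sorted d.keys id false
  (all_sessions.foldl
    (fun (st : List (String × String) × PySem.Set String) session =>
      if session ∈ st.2 then st
      else
        let partner_session := pvPartner session
        if partner_session ≠ "" ∧ d.contains partner_session = true then
          (st.1 ++ [(session, partner_session)], (st.2.add session).add partner_session)
        else st)
    ([], ([] : PySem.Set String))).1

-- ===== PORT B =====
def find_paired_sessions_alt (Soc_data_merged : List (String × Int)) : List (String × String) :=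
  let d := PySem.Dict.ofList Soc_data_merged
  let kept := (PySem.List.sorted d.keys id false).filter
    (fun session =>
      (fun p => decide (p ≠ "") && d.contains p && decide (session ≤ p)) (pvPartner session))
  kept.map (fun session => (session, pvPartner session))

-- ===== PRECONDITION & SPEC =====
def Spec_find_paired_sessions (Soc_data_merged : List (String × Int)) (out : List (String × String)) : Prop := out = find_paired_sessions_alt Soc_data_merged
instance (Soc_data_merged : List (String × Int)) (out : List (String × String)) : Decidable (Spec_find_paired_sessions Soc_data_merged out) := by unfold Spec_find_paired_sessions; infer_instance

-- ===== CLAIM (what is proved, stated in full; the proofs are below) =====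
def Claim_equal_find_paired_sessions : Prop := ∀ (Soc_data_merged : List (String × Int)), Dom_find_paired_sessions Soc_data_merged → Spec_find_paired_sessions Soc_data_merged (find_paired_sessions Soc_data_merged)

-- ===== LEMMAS AND PROOFS =====

def pvSplit1 (u : Char) : List Char → List (List Char)
  | [] => [[]]
  | c :: cs =>
    if c = u then [] :: pvSplit1 u cs
    else
      match pvSplit1 u cs with
      | [] => [[c]]
      | h :: t => (c :: h) :: t
def pvPrep (x : List Char) : List (List Char) → List (List Char)
  | [] => [x]
  | h :: t => (x ++ h) :: t

theorem pvSplit1_ne_nil (u : Char) (l : List Char) : pvSplit1 u l ≠ [] := by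
  cases l with
  | nil => simp [pvSplit1]
  | cons c cs =>
    simp only [pvSplit1]
    split <;> [simp; skip]
    split <;> simp

theorem pvGo_eq (u : Char) (l : List Char) : ∀ (fuel : Nat) (cur : List Char) (acc : List (List Char)),
    l.length ≤ fuel →
    PySem.Chars.splitOn.go [u] fuel l cur acc = acc.reverse ++ pvPrep cur.reverse (pvSplit1 u l) := by
  induction l with
  | nil =>
    intro fuel cur acc _
    cases fuel <;> simp [PySem.Chars.splitOn.go, pvSplit1, pvPrep]
  | cons c cs ih =>
    intro fuel cur acc hf
    cases fuel with
    | zero => simp at hf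
    | succ f =>
      by_cases hc : c = u
      · subst hc
        have hpre : [c].isPrefixOf (c :: cs) = true := by simp [List.isPrefixOf]
        rw [PySem.Chars.splitOn.go, if_pos hpre]
        have hd : List.drop [c].length (c :: cs) = cs := by simp
        rw [hd, ih f [] (cur.reverse :: acc) (by simpa using hf)]
        obtain ⟨h, t, hsplit⟩ : ∃ h t, pvSplit1 c cs = h :: t := by
          cases hs : pvSplit1 c cs with
          | nil => exact absurd hs (pvSplit1_ne_nil c cs)
          | cons h t => exact ⟨h, t, rfl⟩
        simp [pvSplit1, hsplit, pvPrep]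
      · have hpre : [u].isPrefixOf (c :: cs) = false := by
          simp [List.isPrefixOf]
          exact fun h => absurd h.symm hc
        rw [PySem.Chars.splitOn.go, if_neg (by simp [hpre]), ih f (c :: cur) acc (by simpa using hf)]
        obtain ⟨h, t, hsplit⟩ : ∃ h t, pvSplit1 u cs = h :: t := by
          cases hs : pvSplit1 u cs with
          | nil => exact absurd hs (pvSplit1_ne_nil u cs)
          | cons h t => exact ⟨h, t, rfl⟩
        simp [pvSplit1, hc, hsplit, pvPrep]

theorem pvSplitOn_eq (u : Char) (l : List Char) : PySem.Chars.splitOn l [u] = pvSplit1 u l := by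
  rw [PySem.Chars.splitOn, pvGo_eq u l (l.length + 1) [] [] (by omega)]
  obtain ⟨h, t, hsplit⟩ : ∃ h t, pvSplit1 u l = h :: t := by
    cases hs : pvSplit1 u l with
    | nil => exact absurd hs (pvSplit1_ne_nil u l)
    | cons h t => exact ⟨h, t, rfl⟩
  simp [hsplit, pvPrep]

theorem pvSplit1_free (u : Char) (l : List Char) : ∀ p ∈ pvSplit1 u l, u ∉ p := by
  induction l with
  | nil => simp [pvSplit1]
  | cons c cs ih =>
    intro p hp
    by_cases hc : c = u
    · subst hc
      simp only [pvSplit1, if_true] at hp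
      rcases List.mem_cons.mp hp with h | h
      · simp [h]
      · exact ih p h
    · simp only [pvSplit1, if_neg hc] at hp
      obtain ⟨h, t, hs⟩ : ∃ h t, pvSplit1 u cs = h :: t := by
        cases hs : pvSplit1 u cs with
        | nil => exact absurd hs (pvSplit1_ne_nil u cs)
        | cons h t => exact ⟨h, t, rfl⟩
      rw [hs] at hp
      rcases List.mem_cons.mp hp with h1 | h1
      · subst h1
        intro hmem
        rcases List.mem_cons.mp hmem with h2 | h2
        · exact hc h2.symm
        · exact ih h (by simp [hs]) h2
      · exact ih p (by simp [hs, h1])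

theorem pvSplit1_of_free (u : Char) (p : List Char) (h : u ∉ p) : pvSplit1 u p = [p] := by
  induction p with
  | nil => rfl
  | cons c cs ih =>
    have hc : c ≠ u := by intro hc; exact h (hc ▸ List.mem_cons_self)
    have := ih (fun hm => h (List.mem_cons_of_mem _ hm))
    simp [pvSplit1, hc, this]

theorem pvSplit1_append (u : Char) (p : List Char) (l : List Char) (h : u ∉ p) :
    pvSplit1 u (p ++ u :: l) = p :: pvSplit1 u l := by
  induction p with
  | nil => simp [pvSplit1]
  | cons c cs ih =>
    have hc : c ≠ u := by intro hc; exact h (hc ▸ List.mem_cons_self)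
    have := ih (fun hm => h (List.mem_cons_of_mem _ hm))
    simp [pvSplit1, hc, this]

theorem pvJoin_split1 (u : Char) (l : List Char) :
    PySem.Chars.join [u] (pvSplit1 u l) = l := by
  induction l with
  | nil => simp [pvSplit1, PySem.Chars.join_singleton]
  | cons c cs ih =>
    by_cases hc : c = u
    · subst hc
      obtain ⟨h, t, hsplit⟩ : ∃ h t, pvSplit1 c cs = h :: t := by
        cases hs : pvSplit1 c cs with
        | nil => exact absurd hs (pvSplit1_ne_nil c cs)
        | cons h t => exact ⟨h, t, rfl⟩
      rw [hsplit] at ih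
      simp [pvSplit1, hsplit, PySem.Chars.join_cons_cons, ih]
    · obtain ⟨h, t, hsplit⟩ : ∃ h t, pvSplit1 u cs = h :: t := by
        cases hs : pvSplit1 u cs with
        | nil => exact absurd hs (pvSplit1_ne_nil u cs)
        | cons h t => exact ⟨h, t, rfl⟩
      rw [hsplit] at ih
      cases t with
      | nil => simp_all [pvSplit1, PySem.Chars.join_singleton]
      | cons q t2 => simp_all [pvSplit1, PySem.Chars.join_cons_cons]

theorem pvSplit1_join (u : Char) (ps : List (List Char)) (hne : ps ≠ [])
    (hfree : ∀ p ∈ ps, u ∉ p) : pvSplit1 u (PySem.Chars.join [u] ps) = ps := by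
  induction ps with
  | nil => exact absurd rfl hne
  | cons p qs ih =>
    cases qs with
    | nil => rw [PySem.Chars.join_singleton]; exact pvSplit1_of_free u p (hfree p (by simp))
    | cons q rest =>
      rw [PySem.Chars.join_cons_cons]
      have : p ++ [u] ++ PySem.Chars.join [u] (q :: rest) = p ++ u :: PySem.Chars.join [u] (q :: rest) := by simp
      rw [this, pvSplit1_append u p _ (hfree p (by simp)),
        ih (by simp) (fun r hr => hfree r (List.mem_cons_of_mem _ hr))]

-- the per-part swap, on the char-list side
def pvG (cs : List Char) : List Char :=
  (pvSwapMap.getD (String.ofList cs) (String.ofList cs)).toList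

theorem pvSwapMap_getD (p : String) : pvSwapMap.getD p p =
    if p = "Dom" then "Sub" else if p = "Sub" then "Dom"
    else if p = "WT" then "SF1" else if p = "SF1" then "WT" else p := by
  have h : pvSwapMap = PySem.Dict.mk [("Dom","Sub"),("Sub","Dom"),("WT","SF1"),("SF1","WT")] := rfl
  rw [h, PySem.Dict.getD_eq_get?_getD]
  simp only [PySem.Dict.get?_mk_cons, beq_iff_eq]
  by_cases h1 : p = "Dom" <;> by_cases h2 : p = "Sub" <;> by_cases h3 : p = "WT" <;> by_cases h4 : p = "SF1" <;>
    simp_all [eq_comm (b := p), PySem.Dict.get?]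

theorem pvG_eq (cs : List Char) : pvG cs =
    if cs = "Dom".toList then "Sub".toList
    else if cs = "Sub".toList then "Dom".toList
    else if cs = "WT".toList then "SF1".toList
    else if cs = "SF1".toList then "WT".toList
    else cs := by
  have hinj : ∀ (t : String), (String.ofList cs = t) ↔ (cs = t.toList) := by
    intro t
    constructor
    · intro h; rw [← h, String.toList_ofList]
    · intro h; apply String.toList_inj.mp; rw [String.toList_ofList, h]
  rw [pvG, pvSwapMap_getD]
  simp only [hinj, apply_ite String.toList, String.toList_ofList]

theorem pvG_free (cs : List Char) (h : '_' ∉ cs) : '_' ∉ pvG cs := by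
  rw [pvG_eq]
  split_ifs <;> first | decide | exact h

theorem pvG_invol (cs : List Char) : pvG (pvG cs) = cs := by
  rw [pvG_eq cs]
  split_ifs with h1 h2 h3 h4 <;> rw [pvG_eq] <;> simp_all
theorem pvPartner_toList (s : String) :
    (pvPartner s).toList = PySem.Chars.join ['_'] ((pvSplit1 '_' s.toList).map pvG) := by
  have hu : ("_" : String).toList = ['_'] := by decide
  rw [pvPartner, PySem.Str.toList_join, hu, pvSplitOn_eq, List.map_map, List.map_map]
  rfl

theorem pvPartner_empty : pvPartner "" = "" := by decide

theorem pvPartner_invol (s : String) : pvPartner (pvPartner s) = s := by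
  apply String.toList_inj.mp
  rw [pvPartner_toList, pvPartner_toList, pvSplit1_join '_' _ (by simp [pvSplit1_ne_nil])
      (by intro p hp
          obtain ⟨q, hq, rfl⟩ := List.mem_map.mp hp
          exact pvG_free q (pvSplit1_free '_' s.toList q hq)),
    List.map_map]
  have : pvG ∘ pvG = id := funext pvG_invol
  rw [this, List.map_id, pvJoin_split1]

theorem pvLoop (d : PySem.Dict String Int) :
    ∀ (L : List String) (acc : List (String × String)) (proc : PySem.Set String),
    L.Pairwise (· < ·) →
    (∀ s ∈ L, d.contains s = true) →
    (∀ t, d.contains t = true → t ∉ L → ∀ s ∈ L, t < s) →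
    (∀ s ∈ L, s ∈ proc ↔ (d.contains (pvPartner s) = true ∧ pvPartner s ∉ L)) →
    (L.foldl
      (fun (st : List (String × String) × PySem.Set String) session =>
        if session ∈ st.2 then st
        else
          if pvPartner session ≠ "" ∧ d.contains (pvPartner session) = true then
            (st.1 ++ [(session, pvPartner session)],
              (st.2.add session).add (pvPartner session))
          else st)
      (acc, proc)).1
    = acc ++ (L.filter
        (fun session =>
          (fun p => decide (p ≠ "") && d.contains p && decide (session ≤ p)) (pvPartner session))).map
        (fun session => (session, pvPartner session)) := by
  intro L
  induction L with
  | nil => intro acc proc _ _ _ _; simp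
  | cons s rest ih =>
    intro acc proc hpw hkeys hlo hproc
    have hlt_rest : ∀ t ∈ rest, s < t := (List.pairwise_cons.mp hpw).1
    have hpw' : rest.Pairwise (· < ·) := (List.pairwise_cons.mp hpw).2
    have hkeys' : ∀ t ∈ rest, d.contains t = true :=
      fun t ht => hkeys t (List.mem_cons_of_mem _ ht)
    have hlo' : ∀ t, d.contains t = true → t ∉ rest → ∀ x ∈ rest, t < x := by
      intro t hc hnin x hx
      by_cases hts : t = s
      · exact hts ▸ hlt_rest x hx
      · exact hlo t hc (by simp [hts, hnin]) x (List.mem_cons_of_mem _ hx)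
    rw [List.foldl_cons]
    by_cases hmem : s ∈ proc
    · rw [if_pos hmem]
      have hchar := (hproc s List.mem_cons_self).mp hmem
      have hlt : pvPartner s < s := hlo (pvPartner s) hchar.1 hchar.2 s List.mem_cons_self
      have hfilter : (decide (pvPartner s ≠ "") && d.contains (pvPartner s) && decide (s ≤ pvPartner s)) = false := by
        simp [not_le.mpr hlt]
      rw [List.filter_cons_of_neg (by simpa using hfilter)]
      apply ih acc proc hpw' hkeys' hlo'
      intro t ht
      have horig := hproc t (List.mem_cons_of_mem _ ht)
      constructor
      · intro h
        obtain ⟨h1, h2⟩ := horig.mp h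
        exact ⟨h1, fun hr => h2 (List.mem_cons_of_mem _ hr)⟩
      · rintro ⟨h1, h2⟩
        apply horig.mpr
        refine ⟨h1, ?_⟩
        intro hin
        rcases List.mem_cons.mp hin with he | he
        · have h3 : t = pvPartner s := by rw [← pvPartner_invol t, he]
          exact hchar.2 (List.mem_cons_of_mem _ (by rw [← h3]; exact ht))
        · exact h2 he
    · rw [if_neg hmem]
      have hnotchar : ¬(d.contains (pvPartner s) = true ∧ pvPartner s ∉ s :: rest) :=
        fun h => hmem ((hproc s List.mem_cons_self).mpr h)
      by_cases hcond : pvPartner s ≠ "" ∧ d.contains (pvPartner s) = true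
      · rw [if_pos hcond]
        have hin : pvPartner s ∈ s :: rest := by
          by_contra hne
          exact hnotchar ⟨hcond.2, hne⟩
        have hle : s ≤ pvPartner s := by
          rcases List.mem_cons.mp hin with he | he
          · rw [he]
          · exact le_of_lt (hlt_rest _ he)
        rw [List.filter_cons_of_pos (by simp [hcond.1, hcond.2, hle]), List.map_cons]
        have hrw := ih (acc ++ [(s, pvPartner s)]) ((proc.add s).add (pvPartner s)) hpw' hkeys' hlo' ?_
        · rw [hrw, List.append_assoc]
          rfl
        intro t ht
        have hst : s ≠ t := fun h => lt_irrefl s (h ▸ hlt_rest t ht)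
        rw [PySem.Set.mem_add, PySem.Set.mem_add]
        by_cases htp : t = pvPartner s
        · subst htp
          have hpt : pvPartner (pvPartner s) = s := pvPartner_invol s
          constructor
          · intro _
            refine ⟨by rw [hpt]; exact hkeys s List.mem_cons_self, ?_⟩
            rw [hpt]
            intro hs
            exact lt_irrefl s (hlt_rest s hs)
          · intro _
            exact Or.inr rfl
        · have horig := hproc t (List.mem_cons_of_mem _ ht)
          have hpts : pvPartner t ≠ s := by
            intro h
            apply htp
            rw [← h, pvPartner_invol]
          constructor
          · intro h
            rcases h with (h | h) | h
            · obtain ⟨h1, h2⟩ := horig.mp h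
              exact ⟨h1, fun hr => h2 (List.mem_cons_of_mem _ hr)⟩
            · exact absurd h.symm hst
            · exact absurd h htp
          · rintro ⟨h1, h2⟩
            left; left
            apply horig.mpr
            refine ⟨h1, ?_⟩
            intro hin2
            rcases List.mem_cons.mp hin2 with he | he
            · exact hpts he
            · exact h2 he
      · rw [if_neg hcond]
        have hfilter : (decide (pvPartner s ≠ "") && d.contains (pvPartner s) && decide (s ≤ pvPartner s)) = false := by
          by_cases he : pvPartner s = ""
          · simp [he]
          · rcases Decidable.not_and_iff_not_or_not.mp hcond with h | h
            · exact absurd he h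
            · simp [Bool.eq_false_iff.mpr h]
        rw [List.filter_cons_of_neg (by simpa using hfilter)]
        apply ih acc proc hpw' hkeys' hlo'
        intro t ht
        have horig := hproc t (List.mem_cons_of_mem _ ht)
        have hpts : pvPartner t ≠ s := by
          intro h
          have h2 : pvPartner s = t := by rw [← h, pvPartner_invol]
          have hct : d.contains (pvPartner s) = true := h2 ▸ hkeys' t ht
          have hempty : pvPartner s = "" := by
            by_contra hne
            exact hcond ⟨hne, hct⟩
          have ht0 : t = "" := by rw [← h2, hempty]
          have hs0 : s = "" := by rw [← h, ht0, pvPartner_empty]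
          have hfin := hlt_rest t ht
          rw [ht0, hs0] at hfin
          exact lt_irrefl _ hfin
        constructor
        · intro h
          obtain ⟨h1, h2⟩ := horig.mp h
          exact ⟨h1, fun hr => h2 (List.mem_cons_of_mem _ hr)⟩
        · rintro ⟨h1, h2⟩
          apply horig.mpr
          refine ⟨h1, ?_⟩
          intro hin2
          rcases List.mem_cons.mp hin2 with he | he
          · exact hpts he
          · exact h2 he

theorem find_paired_sessions_eq (l : List (String × Int)) :
    find_paired_sessions l = find_paired_sessions_alt l := by
  unfold find_paired_sessions find_paired_sessions_alt
  set d := PySem.Dict.ofList l with hd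
  set L := PySem.List.sorted d.keys id false with hL
  have hperm := PySem.List.sorted_perm d.keys id false
  have hmemL : ∀ x : String, x ∈ L ↔ x ∈ d.keys := fun x => hperm.mem_iff
  have hnd : L.Nodup := hperm.nodup_iff.mpr (PySem.Dict.nodup_keys_ofList l)
  have hpwle : L.Pairwise (· ≤ ·) := by
    have := PySem.List.sorted_pairwise d.keys id
    simpa using this
  have hpw : L.Pairwise (· < ·) :=
    List.sortedLT_iff_pairwise.mp ((List.sortedLE_iff_pairwise.mpr hpwle).sortedLT_of_nodup hnd)
  have hkeys : ∀ s ∈ L, d.contains s = true :=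
    fun s hs => (PySem.Dict.contains_iff_mem_keys d s).mpr ((hmemL s).mp hs)
  have hlo : ∀ t, d.contains t = true → t ∉ L → ∀ s ∈ L, t < s := by
    intro t hc hnin s _
    exact absurd ((hmemL t).mpr ((PySem.Dict.contains_iff_mem_keys d t).mp hc)) hnin
  have hproc : ∀ s ∈ L, s ∈ ([] : PySem.Set String) ↔
      (d.contains (pvPartner s) = true ∧ pvPartner s ∉ L) := by
    intro s _
    constructor
    · intro h; exact absurd h (List.not_mem_nil)
    · rintro ⟨h1, h2⟩
      exact absurd ((hmemL _).mpr ((PySem.Dict.contains_iff_mem_keys d _).mp h1)) h2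
  have := pvLoop d L [] ([] : PySem.Set String) hpw hkeys hlo hproc
  simpa using this

-- ===== VERDICT (by name: the statement is the Claim_ definition above) =====
theorem find_paired_sessions_spec : Claim_equal_find_paired_sessions := by
  intro l _
  unfold Spec_find_paired_sessions
  exact find_paired_sessions_eq l
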